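-- pv_equiv track=rewrite | github.com/chaeyi0318/algorithm | 프로그래머스/2/76502. 괄호 회전하기/괄호 회전하기.py | solution
-- ===== SOURCE A (Python) =====
-- from collections import deque
--
-- def check_str(parens):
--     parens_dict = {
--         ']': '[',
--         '}': '{',
--         ')': '('
--     }
--
--     stack = []
--
--     for ch in parens:
--         if ch in parens_dict.values():
--             stack.append(ch)
--         elif ch in parens_dict.keys():
--             if not stack or stack[-1] != parens_dict[ch]:
--                 return 0
--             stack.pop()
--
--     return 1 if not stack else 0
--
-- def solution(s):
--     parens = deque(s)
--     answer = 0
--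
--     for _ in range(len(parens)):
--         if check_str(parens):
--             answer += 1
--
--         parens.append(parens.popleft())
--
--     return answer
-- ===== SOURCE B (Python) =====
-- def _ok(bs):
--     pairs = {')': '(', ']': '[', '}': '{'}
--     stack = []
--     for ch in bs:
--         if ch in pairs:
--             if not stack or stack[-1] != pairs[ch]:
--                 return 0
--             stack.pop()
--         else:
--             stack.append(ch)
--     return 0 if stack else 1
--
-- def solution(s):
--     brackets = [c for c in s if c in '[]{}()']
--     m = len(brackets)
--     if m == 0:
--         return len(s)
--     valid = [_ok(brackets[k:] + brackets[:k]) for k in range(m)]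
--     answer = 0
--     k = 0
--     for ch in s:
--         answer += valid[k % m]
--         if ch in '[]{}()':
--             k += 1
--     return answer
-- ===== Notes on version B (the rewrite author's own statement) =====
-- stated objective: faster
-- what changed: B filters the bracket characters out once, precomputes a table of which rotations of the bracket subsequence are valid (one stack check per bracket-rotation instead of per string-rotation), and sums table lookups in a single pass over the string; A rotates a deque n times and re-scans the whole rotated string each time.
import Mathlib
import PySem

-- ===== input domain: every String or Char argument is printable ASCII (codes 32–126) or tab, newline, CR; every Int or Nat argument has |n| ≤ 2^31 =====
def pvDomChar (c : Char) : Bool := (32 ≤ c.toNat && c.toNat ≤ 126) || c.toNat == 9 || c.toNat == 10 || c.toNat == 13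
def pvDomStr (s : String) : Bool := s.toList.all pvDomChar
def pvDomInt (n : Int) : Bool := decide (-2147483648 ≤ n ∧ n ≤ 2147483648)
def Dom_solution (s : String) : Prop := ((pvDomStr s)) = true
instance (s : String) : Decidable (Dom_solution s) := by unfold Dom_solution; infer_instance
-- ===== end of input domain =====

-- B filters the brackets out once, precomputes validity of each rotation of the
-- bracket subsequence, and sums a table lookup per character instead of re-scanning
-- the whole rotated string n times (objective: faster by a constant-factor mechanism
-- when non-bracket characters are present; equal value everywhere).

-- ===== PORT A =====
-- parens_dict[ch] for the three closers
def pvPairsA (c : Char) : Char :=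
  if c = ']' then '[' else if c = '}' then '{' else '('

-- ch in parens_dict.values()
def pvIsOpenA (c : Char) : Bool := c == '[' || c == '{' || c == '('
-- ch in parens_dict.keys()
def pvIsCloseA (c : Char) : Bool := c == ']' || c == '}' || c == ')'

-- check_str: loop over chars with a stack (head = top); early `return 0` becomes
-- returning 0 from the recursion
def checkStr : List Char → List Char → Int
  | [], st => if st.isEmpty then 1 else 0
  | c :: t, st =>
    if pvIsOpenA c then checkStr t (c :: st)
    else if pvIsCloseA c then
      match st with
      | [] => 0
      | top :: rest => if top ≠ pvPairsA c then 0 else checkStr t rest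
    else checkStr t st

-- parens.append(parens.popleft())  (deque never empty inside A's loop)
def rot1 : List Char → List Char
  | [] => []
  | c :: t => t ++ [c]

-- the `for _ in range(len(parens))` loop of A
def goA : Nat → List Char → Int → Int
  | 0, _, acc => acc
  | n+1, d, acc => goA n (rot1 d) (acc + checkStr d [])

def solution (s : String) : Int := goA s.toList.length s.toList 0

-- ===== PORT B =====
-- c in '[]{}()'
def pvIsBr (c : Char) : Bool :=
  c == '[' || c == ']' || c == '{' || c == '}' || c == '(' || c == ')'

-- _ok: closers first (ch in pairs), everything else is an opener here
def okB : List Char → List Char → Int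
  | [], st => if st.isEmpty then 1 else 0
  | c :: t, st =>
    if pvIsCloseA c then
      match st with
      | [] => 0
      | top :: rest => if top ≠ pvPairsA c then 0 else okB t rest
    else okB t (c :: st)

-- valid = [_ok(brackets[k:] + brackets[:k]) for k in range(m)]
def validTable (bs : List Char) : List Int :=
  (List.range bs.length).map (fun k => okB (bs.drop k ++ bs.take k) [])

-- the `for ch in s` loop of B; valid[k % m] is always in range (k % m < m), so
-- getD is exact for Python's indexing here
def loopB : List Char → List Int → Nat → Nat → Int → Int
  | [], _, _, _, acc => acc
  | c :: t, valid, m, k, acc =>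
      loopB t valid m (if pvIsBr c then k + 1 else k) (acc + valid.getD (k % m) 0)

def solution_alt (s : String) : Int :=
  let bs := s.toList.filter pvIsBr
  let m := bs.length
  if m = 0 then (s.toList.length : Int)
  else loopB s.toList (validTable bs) m 0 0

-- ===== PRECONDITION & SPEC =====
def Spec_solution (s : String) (out : Int) : Prop := out = solution_alt s
instance (s : String) (out : Int) : Decidable (Spec_solution s out) := by unfold Spec_solution; infer_instance

-- ===== CLAIM (what is proved, stated in full; the proofs are below) =====
def Claim_equal_solution : Prop := ∀ (s : String), Dom_solution s → Spec_solution s (solution s)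

-- ===== LEMMAS AND PROOFS =====

theorem open_not_close {c : Char} (h : pvIsOpenA c = true) : pvIsCloseA c = false := by
  simp [pvIsOpenA] at h
  rcases h with (h | h) | h <;> subst h <;> decide

theorem open_br {c : Char} (h : pvIsOpenA c = true) : pvIsBr c = true := by
  simp [pvIsOpenA] at h
  rcases h with (h | h) | h <;> subst h <;> decide

theorem close_br {c : Char} (h : pvIsCloseA c = true) : pvIsBr c = true := by
  simp [pvIsCloseA] at h
  rcases h with (h | h) | h <;> subst h <;> decide

theorem not_open_close_not_br {c : Char} (h1 : pvIsOpenA c = false)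
    (h2 : pvIsCloseA c = false) : pvIsBr c = false := by
  simp [pvIsOpenA] at h1
  simp [pvIsCloseA] at h2
  simp [pvIsBr]
  tauto

-- check_str sees only the brackets
theorem checkStr_eq_okB_filter (l : List Char) : ∀ st,
    checkStr l st = okB (l.filter pvIsBr) st := by
  induction l with
  | nil => intro st; simp [checkStr, okB]
  | cons c t ih =>
    intro st
    by_cases h1 : pvIsOpenA c = true
    · simp [checkStr, h1, open_br h1, okB, open_not_close h1, ih]
    · by_cases h2 : pvIsCloseA c = true
      · simp only [Bool.not_eq_true] at h1
        simp only [checkStr, h1, h2, List.filter_cons, close_br h2, okB, if_false,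
          Bool.false_eq_true, if_true]
        cases st with
        | nil => rfl
        | cons top rest => by_cases h3 : top = pvPairsA c <;> simp [h3, ih]
      · simp only [Bool.not_eq_true] at h1 h2
        simp [checkStr, h1, h2,
          not_open_close_not_br h1 h2, ih]

def sumA : Nat → List Char → Int
  | 0, _ => 0
  | n+1, d => checkStr d [] + sumA n (rot1 d)

theorem goA_spec (n : Nat) : ∀ d acc, goA n d acc = acc + sumA n d := by
  induction n with
  | zero => intro d acc; simp [goA, sumA]
  | succ n ih => intro d acc; simp [goA, sumA, ih]; ring

def sumB (valid : List Int) (m : Nat) : List Char → Nat → Int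
  | [], _ => 0
  | c :: t, k => valid.getD (k % m) 0 + sumB valid m t (if pvIsBr c then k + 1 else k)

theorem loopB_spec (valid : List Int) (m : Nat) (l : List Char) : ∀ k acc,
    loopB l valid m k acc = acc + sumB valid m l k := by
  induction l with
  | nil => intro k acc; simp [loopB, sumB]
  | cons c t ih => intro k acc; simp [loopB, sumB, ih]; ring

theorem validTable_getD (bs : List Char) (k : Nat) (hk : k < bs.length) :
    (validTable bs).getD k 0 = okB (bs.drop k ++ bs.take k) [] := by
  simp [validTable, List.getD, hk]

-- termwise: A's check of the rotation  u ++ v  equals B's table entry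
theorem termwise (u v : List Char) (hm : 0 < (v.filter pvIsBr ++ u.filter pvIsBr).length) :
    checkStr (u ++ v) [] =
      (validTable (v.filter pvIsBr ++ u.filter pvIsBr)).getD
        ((v.filter pvIsBr).length % (v.filter pvIsBr ++ u.filter pvIsBr).length) 0 := by
  set fv := v.filter pvIsBr with hfv
  set fu := u.filter pvIsBr with hfu
  have hc : checkStr (u ++ v) [] = okB (fu ++ fv) [] := by
    rw [checkStr_eq_okB_filter, List.filter_append]
  rcases Nat.lt_or_ge fv.length (fv ++ fu).length with h | h
  · rw [Nat.mod_eq_of_lt h, validTable_getD _ _ h]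
    rw [List.drop_left, List.take_left]
    exact hc
  · have hfu0 : fu = [] := by
      have hlen : (fv ++ fu).length = fv.length + fu.length := by simp
      have : fu.length = 0 := by omega
      exact List.length_eq_zero_iff.mp this
    have hfl : fv.length = (fv ++ fu).length := by simp [hfu0]
    rw [hfl, Nat.mod_self, validTable_getD _ _ hm]
    simp [hfu0] at hc ⊢
    exact hc

-- all-spaces case: with no brackets every rotation checks valid
theorem sumA_no_brackets (n : Nat) : ∀ d, d.filter pvIsBr = [] → sumA n d = n := by
  induction n with
  | zero => intro d _; simp [sumA]
  | succ n ih =>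
    intro d hd
    have h1 : checkStr d [] = 1 := by
      rw [checkStr_eq_okB_filter, hd]; rfl
    have h2 : (rot1 d).filter pvIsBr = [] := by
      match d, hd with
      | [], _ => simp [rot1]
      | c :: t, hd =>
        simp only [List.filter_cons] at hd
        by_cases hc : pvIsBr c = true
        · simp [hc] at hd
        · simp only [hc, Bool.false_eq_true, if_false] at hd
          simp [rot1, List.filter_append, hc, hd]
    rw [sumA, h1, ih _ h2]
    push_cast; ring

-- the bridge: A's rotation sum equals B's per-character table sum
theorem bridge (bs : List Char) (hm : 0 < bs.length) :
    ∀ (u v : List Char), bs = v.filter pvIsBr ++ u.filter pvIsBr →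
      sumA u.length (u ++ v) = sumB (validTable bs) bs.length u (v.filter pvIsBr).length := by
  intro u
  induction u with
  | nil => intro v _; simp [sumA, sumB]
  | cons c u' ih =>
    intro v hbs
    have hrot : rot1 ((c :: u') ++ v) = u' ++ (v ++ [c]) := by
      simp [rot1]
    have hwit : bs = (v ++ [c]).filter pvIsBr ++ u'.filter pvIsBr := by
      rw [List.filter_append]
      simp only [List.filter_cons] at hbs
      by_cases hc : pvIsBr c = true <;> simp [hc] at hbs ⊢ <;> simp [hbs]
    have hlen : ((v ++ [c]).filter pvIsBr).length =
        (if pvIsBr c then (v.filter pvIsBr).length + 1 else (v.filter pvIsBr).length) := by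
      rw [List.filter_append]
      by_cases hc : pvIsBr c = true <;> simp [hc]
    have hterm := termwise (c :: u') v (by rw [← hbs]; omega)
    rw [← hbs] at hterm
    calc sumA (c :: u').length ((c :: u') ++ v)
        = checkStr ((c :: u') ++ v) [] + sumA u'.length (u' ++ (v ++ [c])) := by
          simp [sumA, rot1, List.append_assoc]
      _ = (validTable bs).getD ((v.filter pvIsBr).length % bs.length) 0
            + sumB (validTable bs) bs.length u' ((v ++ [c]).filter pvIsBr).length := by
          rw [hterm, ih (v ++ [c]) hwit]
      _ = sumB (validTable bs) bs.length (c :: u') (v.filter pvIsBr).length := by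
          rw [sumB, hlen]

-- ===== VERDICT (by name: the statement is the Claim_ definition above) =====
theorem solution_spec : Claim_equal_solution := by
  intro s _
  unfold Spec_solution solution solution_alt
  set l := s.toList with hl
  by_cases hm : (l.filter pvIsBr).length = 0
  · have hnil : l.filter pvIsBr = [] := List.length_eq_zero_iff.mp hm
    simp only [hm, if_true]
    rw [goA_spec, sumA_no_brackets l.length l hnil]
    ring
  · have hm' : 0 < (l.filter pvIsBr).length := Nat.pos_of_ne_zero hm
    simp only [hm, if_false]
    rw [goA_spec, loopB_spec]
    have := bridge (l.filter pvIsBr) hm' l []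
    simp only [List.filter_nil, List.nil_append, List.append_nil, List.length_nil] at this
    rw [this trivial]
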